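-- pv_equiv track=rewrite | github.com/pypi-data/pypi-mirror-188 | packages/pyYAMB/pyYAMB-0.1a0-py3-none-any.whl/pyyamb/tetra-all.py | tetra_count
-- ===== SOURCE A (Python) =====
-- from collections import Counter
--
-- def tetra_count(seq):
-- 	i = 0
-- 	acgt = ['A','C','G','T']
-- 	tetras = [f"{a}{b}{c}{d}" for a in acgt for b in acgt for c in acgt for d in acgt]
-- 	l = len(seq)
-- 	d = {}
-- 	words = [seq[i:i+4] for i in range(l-3)]
-- 	cnt = Counter(words)
--
-- 	return "\t".join([str(cnt.get(i,0)) for i in tetras])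
-- ===== SOURCE B (Python) =====
-- def tetra_count(seq):
-- 	def count_at(t):
-- 		return sum(1 for i in range(len(seq) - 3) if seq[i:i+4] == t)
-- 	out = []
-- 	for a in "ACGT":
-- 		for b in "ACGT":
-- 			for c in "ACGT":
-- 				for d in "ACGT":
-- 					out.append(str(count_at(a + b + c + d)))
-- 	return "\t".join(out)
-- ===== Notes on version B (the rewrite author's own statement) =====
-- stated objective: simpler
-- what changed: Drops the words list, the dict and the Counter entirely: instead of one pass that tallies every window, B makes one dedicated scan per tetranucleotide (loops transposed: per-pattern counting instead of per-window tallying) and emits each count directly in nested ACGT loop order.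
import Mathlib
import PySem

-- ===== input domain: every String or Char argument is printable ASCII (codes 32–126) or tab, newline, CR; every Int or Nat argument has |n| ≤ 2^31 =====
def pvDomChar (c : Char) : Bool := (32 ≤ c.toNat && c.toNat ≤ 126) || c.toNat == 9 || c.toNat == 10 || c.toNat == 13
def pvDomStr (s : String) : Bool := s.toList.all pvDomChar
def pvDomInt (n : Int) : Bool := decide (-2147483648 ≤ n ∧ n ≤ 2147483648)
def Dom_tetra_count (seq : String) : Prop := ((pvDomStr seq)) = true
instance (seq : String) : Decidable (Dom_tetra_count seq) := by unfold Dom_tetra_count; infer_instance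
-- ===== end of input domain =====

-- B drops the words list / dict / Counter of A and instead counts each of the 256
-- tetranucleotides with its own scan of the sequence (loops transposed); simpler,
-- no speed claim.

-- ===== PORT A =====
-- literal port of A: build the 256 tetras, slice out all windows, Counter them,
-- then join the looked-up counts (strings handled as List Char per PySem convention)
def tetra_count (seq : String) : String :=
  let acgt : List Char := ['A', 'C', 'G', 'T']
  let tetras : List (List Char) :=
    acgt.flatMap fun a => acgt.flatMap fun b => acgt.flatMap fun c =>
      acgt.map fun d => [a, b, c, d]
  let l : Int := PySem.Str.len seq
  let words : List (List Char) :=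
    (PySem.List.pyRange 0 (l - 3) 1).map fun i =>
      PySem.Chars.slice seq.toList (some i) (some (i + 4))
  let cnt := PySem.Dict.counter words
  PySem.Str.join "\t" (tetras.map fun t => PySem.Int.toStr (cnt.getD t 0))

-- ===== PORT B =====
-- Source B's count_at: sum(1 for i in range(len(seq)-3) if seq[i:i+4] == t)
def count_at (seq : String) (t : List Char) : Int :=
  (PySem.List.pyRange 0 (PySem.Str.len seq - 3) 1).foldl
    (fun acc i =>
      if PySem.Chars.slice seq.toList (some i) (some (i + 4)) == t then acc + 1 else acc)
    0

-- Source B's nested for-loops over "ACGT" appending str(count_at(a+b+c+d))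
def tetra_count_alt (seq : String) : String :=
  let out : List String :=
    "ACGT".toList.flatMap fun a => "ACGT".toList.flatMap fun b =>
      "ACGT".toList.flatMap fun c => "ACGT".toList.map fun d =>
        PySem.Int.toStr (count_at seq [a, b, c, d])
  PySem.Str.join "\t" out

-- ===== PRECONDITION & SPEC =====
def Spec_tetra_count (seq : String) (out : String) : Prop := out = tetra_count_alt seq
instance (seq : String) (out : String) : Decidable (Spec_tetra_count seq out) := by unfold Spec_tetra_count; infer_instance

-- ===== CLAIM (what is proved, stated in full; the proofs are below) =====
def Claim_equal_tetra_count : Prop := ∀ (seq : String), Dom_tetra_count seq → Spec_tetra_count seq (tetra_count seq)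

-- ===== LEMMAS AND PROOFS =====

-- per-tetra agreement: Counter lookup on the windows list = B's dedicated scan
lemma count_at_eq (seq : String) (t : List Char) :
    (PySem.Dict.counter
        ((PySem.List.pyRange 0 (PySem.Str.len seq - 3) 1).map fun i =>
          PySem.Chars.slice seq.toList (some i) (some (i + 4)))).getD t 0
      = count_at seq t := by
  rw [PySem.Dict.getD_counter]
  unfold count_at
  rw [PySem.List.foldl_if_add_one]
  rw [List.count_eq_countP, List.countP_map]
  simp [Function.comp_def]

def tetrasL : List (List Char) :=
  ['A','C','G','T'].flatMap fun a => ['A','C','G','T'].flatMap fun b =>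
    ['A','C','G','T'].flatMap fun c => ['A','C','G','T'].map fun d => [a, b, c, d]

set_option maxRecDepth 20000 in
set_option maxHeartbeats 1000000 in
theorem tetra_eq (seq : String) : tetra_count seq = tetra_count_alt seq := by
  have hA : tetra_count seq = PySem.Str.join "\t"
      (tetrasL.map fun t => PySem.Int.toStr
        ((PySem.Dict.counter
            ((PySem.List.pyRange 0 (PySem.Str.len seq - 3) 1).map fun i =>
              PySem.Chars.slice seq.toList (some i) (some (i + 4)))).getD t 0)) := rfl
  have hB : tetra_count_alt seq = PySem.Str.join "\t"
      (tetrasL.map fun t => PySem.Int.toStr (count_at seq t)) := by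
    unfold tetra_count_alt tetrasL
    have hl : "ACGT".toList = ['A','C','G','T'] := by decide
    rw [hl]
    simp
  rw [hA, hB]
  congr 1
  exact List.map_congr_left fun t _ => by rw [count_at_eq]

-- ===== VERDICT (by name: the statement is the Claim_ definition above) =====
theorem tetra_count_spec : Claim_equal_tetra_count := by
  intro seq _
  exact tetra_eq seq
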